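-- pv_equiv track=rewrite | github.com/apljungquist/diagv | src/rappf/art.py | _above_has_successor_to_the_right
-- ===== SOURCE A (Python) =====
-- import itertools
-- from typing import (
--     Callable,
--     Dict,
--     Hashable,
--     Iterable,
--     Iterator,
--     List,
--     Literal,
--     Mapping,
--     Optional,
--     Sequence,
--     Tuple,
--     TypeVar,
--     Union,
-- )
--
-- def _above_has_successor_to_the_right(
--     row: int,
--     col: int,
--     successor_lists: Mapping[int, Iterable[int]],
-- ) -> Optional[int]:
--     successors = itertools.chain.from_iterable(
--         successor_lists.get(predecessor, []) for predecessor in range(row)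
--     )
--     try:
--         return col < max(successors)
--     except ValueError:
--         return False
-- ===== SOURCE B (Python) =====
-- def _above_has_successor_to_the_right(row, col, successor_lists):
--     for predecessor, successors in successor_lists.items():
--         if 0 <= predecessor < row:
--             for s in successors:
--                 if s > col:
--                     return True
--     return False
-- ===== Notes on version B (the rewrite author's own statement) =====
-- stated objective: alternative
-- what changed: Instead of iterating range(row) and doing one dict lookup per index (plus chain+max+ValueError handling), B makes a single pass over the mapping's items, keeps only entries whose key lies in [0, row), and returns True at the first successor exceeding col.
import Mathlib
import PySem

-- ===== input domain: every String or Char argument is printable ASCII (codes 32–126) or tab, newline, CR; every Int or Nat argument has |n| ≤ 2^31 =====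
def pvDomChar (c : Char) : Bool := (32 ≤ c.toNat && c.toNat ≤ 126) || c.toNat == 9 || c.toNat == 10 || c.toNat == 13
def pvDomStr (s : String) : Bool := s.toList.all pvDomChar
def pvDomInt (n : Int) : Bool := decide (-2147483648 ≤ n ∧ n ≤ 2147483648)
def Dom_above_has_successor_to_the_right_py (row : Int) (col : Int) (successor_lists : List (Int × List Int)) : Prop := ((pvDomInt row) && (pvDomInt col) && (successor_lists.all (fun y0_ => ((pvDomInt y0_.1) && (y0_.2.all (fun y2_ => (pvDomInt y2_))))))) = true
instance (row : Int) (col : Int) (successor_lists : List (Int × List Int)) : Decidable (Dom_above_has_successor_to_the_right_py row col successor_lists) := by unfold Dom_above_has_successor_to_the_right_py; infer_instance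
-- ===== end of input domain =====

-- B scans the mapping's items once (keys filtered to [0, row), early return at the first
-- successor > col) instead of A's lookup per index of range(row) + chain + max + ValueError.

-- ===== PORT A =====
-- successors = chain.from_iterable(successor_lists.get(p, []) for p in range(row));
-- try: return col < max(successors) except ValueError: return False
def above_has_successor_to_the_right_py (row : Int) (col : Int) (successor_lists : List (Int × List Int)) : Bool :=
  let successors : List Int :=
    (PySem.List.pyRange 0 row 1).foldl
      (fun acc predecessor => acc ++ (PySem.Dict.mk successor_lists).getD predecessor []) []
  match successors.max? with
  | none => false          -- max([]) raises ValueError; A returns False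
  | some m => decide (col < m)

-- ===== PORT B =====
-- for predecessor, successors in successor_lists.items():
--   if 0 <= predecessor < row:
--     for s in successors:
--       if s > col: return True
-- return False
def pvAltLoop (row : Int) (col : Int) : List (Int × List Int) → Bool
  | [] => false
  | (predecessor, successors) :: rest =>
    if 0 ≤ predecessor ∧ predecessor < row then
      if successors.any (fun s => decide (s > col)) then true
      else pvAltLoop row col rest
    else pvAltLoop row col rest

def above_has_successor_to_the_right_py_alt (row : Int) (col : Int) (successor_lists : List (Int × List Int)) : Bool :=
  pvAltLoop row col (PySem.Dict.mk successor_lists).items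

-- ===== PRECONDITION & SPEC =====
-- Pre_ excludes association lists with duplicate keys: a Python dict cannot contain them, so
-- which of the duplicate entries the assoc-list representation means is ambiguous (first vs last).
def Pre_above_has_successor_to_the_right_py (row : Int) (col : Int) (successor_lists : List (Int × List Int)) : Prop :=
  (successor_lists.map Prod.fst).Nodup
instance (row : Int) (col : Int) (successor_lists : List (Int × List Int)) : Decidable (Pre_above_has_successor_to_the_right_py row col successor_lists) := by unfold Pre_above_has_successor_to_the_right_py; infer_instance

def pvWitness_above_has_successor_to_the_right_py : Int × Int × (List (Int × List Int)) :=
  (2, 0, [(0, [1]), (1, [3])])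

def Spec_above_has_successor_to_the_right_py (row : Int) (col : Int) (successor_lists : List (Int × List Int)) (out : Bool) : Prop := out = above_has_successor_to_the_right_py_alt row col successor_lists
instance (row : Int) (col : Int) (successor_lists : List (Int × List Int)) (out : Bool) : Decidable (Spec_above_has_successor_to_the_right_py row col successor_lists out) := by unfold Spec_above_has_successor_to_the_right_py; infer_instance

-- ===== CLAIM (what is proved, stated in full; the proofs are below) =====
def Claim_equal_above_has_successor_to_the_right_py : Prop := ∀ (row : Int) (col : Int) (successor_lists : List (Int × List Int)), Dom_above_has_successor_to_the_right_py row col successor_lists → Pre_above_has_successor_to_the_right_py row col successor_lists → Spec_above_has_successor_to_the_right_py row col successor_lists (above_has_successor_to_the_right_py row col successor_lists)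

-- ===== LEMMAS AND PROOFS =====

-- B's early-returning double loop is the existential scan over the items list.
theorem pvAltLoop_eq_any (row col : Int) (l : List (Int × List Int)) :
    pvAltLoop row col l
      = l.any (fun p => decide (0 ≤ p.1 ∧ p.1 < row) && p.2.any (fun s => decide (s > col))) := by
  induction l with
  | nil => rfl
  | cons hd tl ih =>
    obtain ⟨p, ss⟩ := hd
    simp only [pvAltLoop, List.any_cons, ih]
    split_ifs with h1 h2
    · simp [h1, h2]
    · simp [h1, h2]
    · simp [h1]

-- 'col < max(xs)' with ValueError→False equals the existential scan 'any s > col'.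
theorem max?_lt_any (xs : List Int) (col : Int) :
    (match xs.max? with
     | none => false
     | some m => decide (col < m)) = xs.any (fun s => decide (s > col)) := by
  cases h : xs.max? with
  | none =>
    rw [List.max?_eq_none_iff] at h
    simp [h]
  | some m =>
    simp only []
    rw [Bool.eq_iff_iff]
    simp only [decide_eq_true_eq, List.any_eq_true, gt_iff_lt]
    constructor
    · exact fun hc => ⟨m, List.max?_mem h, hc⟩
    · rintro ⟨s, hs, hc⟩
      exact lt_of_lt_of_le hc ((List.max?_le_iff h).1 (le_refl m) s hs)

-- With Nodup keys, the range-indexed lookup scan and the items scan see the same successors.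
theorem range_getD_any_eq_items_any (row col : Int) (sl : List (Int × List Int))
    (hnd : (PySem.Dict.mk sl).keys.Nodup) :
    (PySem.List.pyRange 0 row 1).any
        (fun p => ((PySem.Dict.mk sl).getD p []).any (fun s => decide (s > col)))
      = (PySem.Dict.mk sl).items.any
          (fun p => decide (0 ≤ p.1 ∧ p.1 < row) && p.2.any (fun s => decide (s > col))) := by
  rw [Bool.eq_iff_iff]
  simp only [List.any_eq_true, PySem.List.mem_pyRange_one, Bool.and_eq_true, decide_eq_true_eq]
  constructor
  · rintro ⟨p, ⟨hp0, hpr⟩, s, hs, hsc⟩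
    cases hg : (PySem.Dict.mk sl).get? p with
    | none =>
      rw [PySem.Dict.getD_eq_get?_getD, hg] at hs
      simp at hs
    | some ss =>
      refine ⟨(p, ss), PySem.Dict.mem_items_of_get?_eq_some (PySem.Dict.mk sl) hg, ⟨hp0, hpr⟩, ?_⟩
      rw [PySem.Dict.getD_eq_get?_getD, hg] at hs
      exact ⟨s, hs, hsc⟩
  · rintro ⟨⟨p, ss⟩, hmem, ⟨hp0, hpr⟩, s, hs, hsc⟩
    refine ⟨p, ⟨hp0, hpr⟩, ?_⟩
    rw [PySem.Dict.getD_of_mem_items (PySem.Dict.mk sl) hmem hnd]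
    exact ⟨s, hs, hsc⟩

-- ===== VERDICT (by name: the statement is the Claim_ definition above) =====
theorem above_has_successor_to_the_right_py_spec : Claim_equal_above_has_successor_to_the_right_py := by
  intro row col sl _ hpre
  unfold Spec_above_has_successor_to_the_right_py
  unfold above_has_successor_to_the_right_py above_has_successor_to_the_right_py_alt
  have hnd : (PySem.Dict.mk sl).keys.Nodup := by
    simpa [PySem.Dict.keys_mk] using hpre
  rw [pvAltLoop_eq_any, ← range_getD_any_eq_items_any row col sl hnd,
      PySem.List.foldl_append_eq_flatMap, List.nil_append,
      max?_lt_any ((PySem.List.pyRange 0 row 1).flatMap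
        (fun p => (PySem.Dict.mk sl).getD p [])) col]
  simp [List.any_flatMap]
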